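-- pv_equiv track=rewrite | github.com/stone1098/algorithm | Brute Force/boj_12100.py | action
-- ===== SOURCE A (Python) =====
-- def action(N, matrix, direction):
--     temp = []
--     if direction == 'L':
--         for line in matrix:
--             # 한 줄에 대하여 0을 모두 제거
--             line = [l for l in line if l != 0]
--             for i in range(1, len(line)):
--                 if line[i-1] == line[i]:
--                     line[i-1] *= 2
--                     line[i] = 0
--             # 다시 0을 제거
--             line = [l for l in line if l != 0]
--             # 부족한 0 채워줌
--             padding = [0] * (N - len(line))
--             line = line + padding
--             temp.append(line)
--     if direction == 'R':
--         for line in matrix: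
--             # 한 줄에 대하여 0을 모두 제거
--             line = [l for l in line if l != 0]
--             for i in range(len(line)-1, 0, -1):
--                 if line[i] == line[i-1]:
--                     line[i] *= 2
--                     line[i-1] = 0
--             # 다시 0을 제거
--             line = [l for l in line if l != 0]
--             # 부족한 0 채워줌
--             padding = [0] * (N - len(line))
--             line = padding + line
--             temp.append(line)
--     if direction == 'U':
--         temp = [[0] * N for _ in range(N)]
--         for j in range(N): # j번 열만 뽑아서 처리
--             temp_col = list()
--             for i in range(N):
--                 temp_col.append(matrix[i][j])
--             temp_col = [t for t in temp_col if t != 0]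
--             for i in range(1, len(temp_col)):
--                 if temp_col[i] == temp_col[i-1]:
--                     temp_col[i-1] *= 2
--                     temp_col[i] = 0
--             temp_col = [t for t in temp_col if t != 0]
--             padding = [0] * (N - len(temp_col))
--             temp_col = temp_col + padding
--             for i in range(N):
--                 temp[i][j] = temp_col[i]
--     if direction == 'D':
--         temp = [[0] * N for _ in range(N)]
--         for j in range(N): # j번 열만 뽑아서 처리
--             temp_col = list()
--             for i in range(N):
--                 temp_col.append(matrix[i][j])
--             temp_col = [t for t in temp_col if t != 0]
--             for i in range(len(temp_col)-1, 0, -1):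
--                 if temp_col[i] == temp_col[i-1]:
--                     temp_col[i] *= 2
--                     temp_col[i-1] = 0
--             temp_col = [t for t in temp_col if t != 0]
--             padding = [0] * (N - len(temp_col))
--             temp_col = padding + temp_col
--             for i in range(N):
--                 temp[i][j] = temp_col[i]
--
--     return temp
-- ===== SOURCE B (Python) =====
-- def _pairs(line):
--     # fold adjacent equal pairs left-to-right: [2,2,2] -> [4,2], [2,2,2,2] -> [4,4]
--     if len(line) >= 2 and line[0] == line[1]:
--         return [2 * line[0]] + _pairs(line[2:])
--     if line:
--         return [line[0]] + _pairs(line[1:])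
--     return []
--
--
-- def merge_left(line):
--     return _pairs([x for x in line if x != 0])
--
--
-- def action(N, matrix, direction):
--     pad_r = lambda l: l + [0] * (N - len(l))
--     pad_l = lambda l: [0] * (N - len(l)) + l
--     if direction == 'L':
--         return [pad_r(merge_left(row)) for row in matrix]
--     if direction == 'R':
--         return [pad_l(list(reversed(merge_left(reversed(row))))) for row in matrix]
--     if direction in ('U', 'D'):
--         cols = [[matrix[i][j] for i in range(N)] for j in range(N)]
--         if direction == 'U':
--             new_cols = [pad_r(merge_left(c)) for c in cols]
--         else:
--             new_cols = [pad_l(list(reversed(merge_left(reversed(c))))) for c in cols]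
--         return [[new_cols[j][i] for j in range(N)] for i in range(N)]
--     return []
-- ===== Notes on version B (the rewrite author's own statement) =====
-- stated objective: simpler
-- what changed: A's four near-identical inlined blocks (in-place index loops that merge by doubling and zeroing cells, plus a column-write-back loop over a preallocated grid) are replaced by one shared merge helper (strip zeros, fold adjacent equal pairs recursively) applied per row, via row reversal for R, and via transpose/re-transpose comprehensions for U and D.
-- outside the precondition, e.g. on action(2, [[2, 2]], 'U'): A raises IndexError, B raises IndexError
import Mathlib
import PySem

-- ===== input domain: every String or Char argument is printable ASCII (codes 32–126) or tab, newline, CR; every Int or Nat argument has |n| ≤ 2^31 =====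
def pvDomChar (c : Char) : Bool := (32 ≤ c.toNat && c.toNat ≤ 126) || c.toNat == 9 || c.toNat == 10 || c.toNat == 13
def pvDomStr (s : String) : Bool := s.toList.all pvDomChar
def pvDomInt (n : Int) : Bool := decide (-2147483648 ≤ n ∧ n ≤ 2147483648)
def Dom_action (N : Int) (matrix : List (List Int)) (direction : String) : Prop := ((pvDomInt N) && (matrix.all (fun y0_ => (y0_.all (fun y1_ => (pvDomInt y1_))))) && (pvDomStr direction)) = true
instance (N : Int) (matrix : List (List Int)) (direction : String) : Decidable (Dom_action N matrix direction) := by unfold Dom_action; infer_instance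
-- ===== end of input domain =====

-- B is a different decomposition of the same 2048 move: one shared merge routine applied via
-- row-reversal and transposition, instead of A's four inlined in-place index loops. (objective: simpler)

-- ===== PORT A =====
-- A repeats the same "strip zeros, merge in place, strip zeros" block verbatim in all four
-- branches; the repeated block is extracted here as helpers, ported step for step.
-- the in-place left merge loop: for i in range(1, len(line)): …
def aLoopL (line : List Int) : List Int :=
  (PySem.List.pyRange 1 (PySem.List.len line) 1).foldl (fun line i =>
    if PySem.List.pyGetD line (i - 1) 0 == PySem.List.pyGetD line i 0 then
      PySem.List.pySetD (PySem.List.pySetD line (i - 1) (PySem.List.pyGetD line (i - 1) 0 * 2)) i 0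
    else line) line

-- the in-place right merge loop: for i in range(len(line)-1, 0, -1): …
def aLoopR (line : List Int) : List Int :=
  (PySem.List.pyRange (PySem.List.len line - 1) 0 (-1)).foldl (fun line i =>
    if PySem.List.pyGetD line i 0 == PySem.List.pyGetD line (i - 1) 0 then
      PySem.List.pySetD (PySem.List.pySetD line i (PySem.List.pyGetD line i 0 * 2)) (i - 1) 0
    else line) line

-- strip zeros, merge left, strip zeros (A's repeated block for L and U)
def aProcL (line : List Int) : List Int :=
  ((aLoopL (line.filter (fun l => l != 0))).filter (fun l => l != 0))

-- strip zeros, merge right, strip zeros (A's repeated block for R and D)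
def aProcR (line : List Int) : List Int :=
  ((aLoopR (line.filter (fun l => l != 0))).filter (fun l => l != 0))

def action (N : Int) (matrix : List (List Int)) (direction : String) : List (List Int) :=
  let temp : List (List Int) := []
  let temp := if direction == "L" then
      matrix.foldl (fun temp line =>
        let line := aProcL line
        let padding := List.replicate (N - PySem.List.len line).toNat (0 : Int)
        temp ++ [line ++ padding]) temp
    else temp
  let temp := if direction == "R" then
      matrix.foldl (fun temp line =>
        let line := aProcR line
        let padding := List.replicate (N - PySem.List.len line).toNat (0 : Int)
        temp ++ [padding ++ line]) temp
    else temp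
  let temp := if direction == "U" then
      let temp := (PySem.List.pyRange 0 N 1).map (fun _ => List.replicate N.toNat (0 : Int))
      (PySem.List.pyRange 0 N 1).foldl (fun temp j =>
        let col := (PySem.List.pyRange 0 N 1).foldl (fun c i =>
            c ++ [PySem.List.pyGetD (PySem.List.pyGetD matrix i []) j 0]) []
        let col := aProcL col
        let col := col ++ List.replicate (N - PySem.List.len col).toNat (0 : Int)
        (PySem.List.pyRange 0 N 1).foldl (fun temp i =>
          PySem.List.pySetD temp i
            (PySem.List.pySetD (PySem.List.pyGetD temp i []) j (PySem.List.pyGetD col i 0))) temp) temp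
    else temp
  let temp := if direction == "D" then
      let temp := (PySem.List.pyRange 0 N 1).map (fun _ => List.replicate N.toNat (0 : Int))
      (PySem.List.pyRange 0 N 1).foldl (fun temp j =>
        let col := (PySem.List.pyRange 0 N 1).foldl (fun c i =>
            c ++ [PySem.List.pyGetD (PySem.List.pyGetD matrix i []) j 0]) []
        let col := aProcR col
        let col := List.replicate (N - PySem.List.len col).toNat (0 : Int) ++ col
        (PySem.List.pyRange 0 N 1).foldl (fun temp i =>
          PySem.List.pySetD temp i
            (PySem.List.pySetD (PySem.List.pyGetD temp i []) j (PySem.List.pyGetD col i 0))) temp) temp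
    else temp
  temp

-- ===== PORT B =====
-- fold adjacent equal pairs left-to-right: [2,2,2] -> [4,2], [2,2,2,2] -> [4,4]
def bPairs : List Int → List Int
  | [] => []
  | [x] => [x]
  | x :: y :: rest => if x == y then (2 * x) :: bPairs rest else x :: bPairs (y :: rest)

def bMergeLeft (line : List Int) : List Int := bPairs (line.filter (fun x => x != 0))

def bPadR (N : Int) (l : List Int) : List Int := l ++ List.replicate (N - PySem.List.len l).toNat (0 : Int)

def bPadL (N : Int) (l : List Int) : List Int := List.replicate (N - PySem.List.len l).toNat (0 : Int) ++ l

def action_alt (N : Int) (matrix : List (List Int)) (direction : String) : List (List Int) :=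
  if direction == "L" then
    matrix.map (fun row => bPadR N (bMergeLeft row))
  else if direction == "R" then
    matrix.map (fun row => bPadL N (bMergeLeft row.reverse).reverse)
  else if direction == "U" || direction == "D" then
    let cols := (PySem.List.pyRange 0 N 1).map (fun j =>
      (PySem.List.pyRange 0 N 1).map (fun i => PySem.List.pyGetD (PySem.List.pyGetD matrix i []) j 0))
    let newCols := if direction == "U" then cols.map (fun c => bPadR N (bMergeLeft c))
      else cols.map (fun c => bPadL N (bMergeLeft c.reverse).reverse)
    (PySem.List.pyRange 0 N 1).map (fun i =>
      (PySem.List.pyRange 0 N 1).map (fun j => PySem.List.pyGetD (PySem.List.pyGetD newCols j []) i 0))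
  else []

-- ===== PRECONDITION & SPEC =====
-- Pre_ excludes exactly the inputs where Python A raises IndexError: directions 'U'/'D' with a
-- matrix whose top-left N×N block is not fully present (matrix[i][j] for i,j < N out of range).
def Pre_action (N : Int) (matrix : List (List Int)) (direction : String) : Prop :=
  (direction = "U" ∨ direction = "D") →
    (N ≤ (matrix.length : Int) ∧ ∀ row ∈ matrix.take N.toNat, N ≤ (row.length : Int))
instance (N : Int) (matrix : List (List Int)) (direction : String) : Decidable (Pre_action N matrix direction) := by unfold Pre_action; infer_instance

def pvWitness_action : Int × List (List Int) × String := (2, [[2, 2], [4, 0]], "U")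

def Spec_action (N : Int) (matrix : List (List Int)) (direction : String) (out : List (List Int)) : Prop := out = action_alt N matrix direction
instance (N : Int) (matrix : List (List Int)) (direction : String) (out : List (List Int)) : Decidable (Spec_action N matrix direction out) := by unfold Spec_action; infer_instance

-- ===== CLAIM (what is proved, stated in full; the proofs are below) =====
def Claim_equal_action : Prop := ∀ (N : Int) (matrix : List (List Int)) (direction : String), Dom_action N matrix direction → Pre_action N matrix direction → Spec_action N matrix direction (action N matrix direction)

-- ===== LEMMAS AND PROOFS =====

-- stepM models A's in-place left-merge pass: the value carried at the cursor
-- is compared with the next original cell; a merge leaves a 0 behind it.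
def stepM : List Int → List Int
  | [] => []
  | [x] => [x]
  | a :: b :: t => if a = b then (a * 2) :: stepM (0 :: t) else a :: stepM (b :: t)
termination_by l => l.length
decreasing_by all_goals (simp; try omega)

lemma getD_app0 (pre ys : List Int) (x d : Int) : (pre ++ x :: ys).getD pre.length d = x := by
  simp [List.getD_eq_getElem?_getD]

lemma getD_app1 (pre ys : List Int) (x y d : Int) : (pre ++ x :: y :: ys).getD (pre.length+1) d = y := by
  simp [List.getD_eq_getElem?_getD]

lemma set_app0 (pre ys : List Int) (x v : Int) : (pre ++ x :: ys).set pre.length v = pre ++ v :: ys := by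
  rw [List.set_append_right _ _ (le_refl _)]; simp

lemma set_app1 (pre ys : List Int) (x y v : Int) : (pre ++ x :: y :: ys).set (pre.length+1) v = pre ++ x :: v :: ys := by
  rw [List.set_append_right _ _ (by omega)]; simp

lemma aLoopL_gen : ∀ (n : Nat) (rest pre : List Int), rest.length = n →
    (PySem.List.pyRange ((pre.length : Int) + 1) ((pre.length : Int) + (rest.length : Int)) 1).foldl
      (fun line i =>
        if PySem.List.pyGetD line (i - 1) 0 == PySem.List.pyGetD line i 0 then
          PySem.List.pySetD (PySem.List.pySetD line (i - 1) (PySem.List.pyGetD line (i - 1) 0 * 2)) i 0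
        else line) (pre ++ rest)
    = pre ++ stepM rest := by
  intro n
  induction n with
  | zero => intro rest pre h; rw [List.length_eq_zero_iff] at h; subst h
            simp [PySem.List.pyRange_one_eq_nil, stepM]
  | succ n ih =>
    intro rest pre h
    match rest with
    | [a] => simp [PySem.List.pyRange_one_eq_nil, stepM]
    | a :: b :: t =>
      rw [PySem.List.pyRange_one_cons (by simp only [List.length_cons]; omega)]
      rw [List.foldl_cons]
      have e1 : ((pre.length : Int) + 1 - 1) = ((pre.length : Nat) : Int) := by omega
      have e2 : ((pre.length : Int) + 1) = (((pre.length + 1 : Nat)) : Int) := by push_cast; omega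
      rw [e1, e2]
      simp only [PySem.List.pyGetD_natCast, PySem.List.pySetD_natCast]
      rw [getD_app0, getD_app1]
      by_cases hab : a = b
      · subst hab
        simp only [beq_self_eq_true, if_true]
        rw [set_app0, set_app1]
        have state : pre ++ a * 2 :: (0:Int) :: t = (pre ++ [a * 2]) ++ (0 :: t) := by simp
        rw [state]
        have hr : (((pre.length + 1 : Nat)) : Int) + 1 = (((pre ++ [a*2]).length : Int) + 1) := by simp
        have hr2 : ((pre.length : Int) + ((a :: a :: t).length : Int)) = (((pre ++ [a*2]).length : Int) + (((0:Int) :: t).length : Int)) := by simp; omega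
        rw [hr, hr2, ih (0 :: t) (pre ++ [a*2]) (by simp at h ⊢; omega)]
        simp [stepM]
      · have : (a == b) = false := by simp [hab]
        rw [this]
        simp only [if_false, Bool.false_eq_true]
        have state : pre ++ a :: b :: t = (pre ++ [a]) ++ (b :: t) := by simp
        rw [state]
        have hr : (((pre.length + 1 : Nat)) : Int) + 1 = (((pre ++ [a]).length : Int) + 1) := by simp
        have hr2 : ((pre.length : Int) + ((a :: b :: t).length : Int)) = (((pre ++ [a]).length : Int) + ((b :: t).length : Int)) := by simp; omega
        rw [hr, hr2, ih (b :: t) (pre ++ [a]) (by simp at h ⊢; omega)]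
        simp [stepM, hab]

lemma stepM_filter : ∀ (n : Nat) (l : List Int), l.length = n → (∀ x ∈ l, x ≠ 0) →
    (stepM l).filter (fun x => x != 0) = bPairs l := by
  intro n
  induction n using Nat.strong_induction_on with
  | _ n ih =>
    intro l hn hnz
    match l with
    | [] => simp [stepM, bPairs]
    | [x] => have : x ≠ 0 := hnz x (by simp)
             simp [stepM, bPairs, this]
    | a :: b :: t =>
      have ha : a ≠ 0 := hnz a (by simp)
      have hb : b ≠ 0 := hnz b (by simp)
      by_cases hab : a = b
      · subst hab
        rw [stepM, if_pos rfl, bPairs]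
        simp only [beq_self_eq_true, if_true]
        have h2a : (a * 2 : Int) ≠ 0 := by omega
        rw [List.filter_cons_of_pos (by simpa using h2a)]
        have htail : (stepM ((0:Int) :: t)).filter (fun x => x != 0) = bPairs t := by
          match t with
          | [] => simp [stepM, bPairs]
          | c :: t' =>
            have hc : c ≠ 0 := hnz c (by simp)
            rw [stepM, if_neg (by omega)]
            rw [List.filter_cons_of_neg (by simp)]
            exact ih (t'.length + 1) (by simp only [List.length_cons] at hn; omega) (c :: t') rfl (fun x hx => hnz x (by simp at hx ⊢; tauto))
        rw [htail]
        congr 1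
        omega
      · rw [stepM, if_neg hab, bPairs]
        have : (a == b) = false := by simp [hab]
        rw [this]
        simp only [Bool.false_eq_true, if_false]
        rw [List.filter_cons_of_pos (by simpa using ha)]
        rw [ih (t.length + 1) (by simp only [List.length_cons] at hn; omega) (b :: t) rfl (fun x hx => hnz x (by simp at hx ⊢; tauto))]

lemma aLoopR_gen : ∀ (n : Nat) (r suf : List Int), r.length = n →
    (PySem.List.pyRange ((r.length : Int) - 1) 0 (-1)).foldl
      (fun line i =>
        if PySem.List.pyGetD line i 0 == PySem.List.pyGetD line (i - 1) 0 then
          PySem.List.pySetD (PySem.List.pySetD line i (PySem.List.pyGetD line i 0 * 2)) (i - 1) 0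
        else line) (r.reverse ++ suf)
    = (stepM r).reverse ++ suf := by
  intro n
  induction n with
  | zero => intro r suf h; rw [List.length_eq_zero_iff] at h; subst h
            simp [PySem.List.pyRange_neg_one_eq_nil, stepM]
  | succ n ih =>
    intro r suf h
    match r with
    | [a] => simp [PySem.List.pyRange_neg_one_eq_nil, stepM]
    | a :: b :: t =>
      rw [PySem.List.pyRange_neg_one_cons (by simp only [List.length_cons]; omega)]
      rw [List.foldl_cons]
      have e1 : (((a :: b :: t).length : Int) - 1) = (((t.length + 1 : Nat)) : Int) := by simp
      have e2 : ((((t.length + 1 : Nat)) : Int) - 1) = ((t.length : Nat) : Int) := by omega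
      rw [e1, e2]
      simp only [PySem.List.pyGetD_natCast, PySem.List.pySetD_natCast]
      have hrev : (a :: b :: t).reverse ++ suf = t.reverse ++ b :: a :: suf := by simp
      rw [hrev]
      have g1 : (t.reverse ++ b :: a :: suf).getD (t.length + 1) 0 = a := by
        have := getD_app1 t.reverse (a :: suf) b a 0; simpa using this
      have g0 : (t.reverse ++ b :: a :: suf).getD t.length 0 = b := by
        have := getD_app0 t.reverse (a :: suf) b 0; simpa using this
      rw [g1, g0]
      by_cases hab : a = b
      · subst hab
        simp only [beq_self_eq_true, if_true]
        have s1 : (t.reverse ++ a :: a :: suf).set (t.length + 1) (a * 2) = t.reverse ++ a :: a * 2 :: suf := by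
          have := set_app1 t.reverse suf a a (a * 2); simpa using this
        have s0 : (t.reverse ++ a :: a * 2 :: suf).set t.length 0 = t.reverse ++ (0:Int) :: a * 2 :: suf := by
          have := set_app0 t.reverse (a * 2 :: suf) a (0:Int); simpa using this
        rw [s1, s0]
        have state : t.reverse ++ (0:Int) :: a * 2 :: suf = ((0:Int) :: t).reverse ++ (a * 2 :: suf) := by simp
        have hlen : ((t.length : Nat) : Int) = ((((0:Int) :: t).length : Int) - 1) := by simp
        rw [state, hlen, ih ((0:Int) :: t) (a * 2 :: suf) (by simp only [List.length_cons] at h ⊢; omega)]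
        rw [stepM, if_pos rfl]
        simp
      · have hne : (a == b) = false := by simp [hab]
        rw [hne]
        simp only [Bool.false_eq_true, if_false]
        have state : t.reverse ++ b :: a :: suf = (b :: t).reverse ++ (a :: suf) := by simp
        have hlen : ((t.length : Nat) : Int) = (((b :: t).length : Int) - 1) := by simp
        rw [state, hlen, ih (b :: t) (a :: suf) (by simp only [List.length_cons] at h ⊢; omega)]
        rw [stepM, if_neg hab]
        simp

lemma aLoopL_eq (l : List Int) : aLoopL l = stepM l := by
  have := aLoopL_gen l.length l [] rfl
  simpa [aLoopL] using this

lemma aLoopR_eq (l : List Int) : aLoopR l = (stepM l.reverse).reverse := by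
  have := aLoopR_gen l.reverse.length l.reverse [] rfl
  simpa [aLoopR] using this

lemma nonzero_filter (l : List Int) : ∀ x ∈ l.filter (fun v => v != 0), x ≠ 0 := by
  intro x hx
  simpa using (List.of_mem_filter hx)

lemma procL_eq (row : List Int) : aProcL row = bMergeLeft row := by
  rw [aProcL, aLoopL_eq, bMergeLeft]
  exact stepM_filter _ _ rfl (nonzero_filter row)

lemma procR_eq (row : List Int) : aProcR row = (bMergeLeft row.reverse).reverse := by
  rw [aProcR, aLoopR_eq, bMergeLeft, ← List.filter_reverse, List.filter_reverse]
  rw [stepM_filter _ _ rfl (nonzero_filter row.reverse)]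

lemma set_map_pyRange {α : Type} (f : Int → α) (N : Int) (m : Nat) (_hm : (m : Int) < N) (v : α) :
    ((PySem.List.pyRange 0 N 1).map f).set m v
    = (PySem.List.pyRange 0 N 1).map (fun i => if i = (m : Int) then v else f i) := by
  apply List.ext_getElem
  · simp
  · intro k hk hk2
    simp only [List.length_set, List.length_map, PySem.List.length_pyRange_one] at hk
    rw [List.getElem_set, List.getElem_map, List.getElem_map]
    simp only [PySem.List.getElem_pyRange_one]
    by_cases h : m = k
    · subst h; simp
    · rw [if_neg h, if_neg (by omega)]

lemma wc_map (N j : Int) (c : List Int) (g : Int → List Int) : ∀ (m : Nat), (m : Int) ≤ N →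
    (PySem.List.pyRange 0 (m : Int) 1).foldl (fun t i =>
      PySem.List.pySetD t i (PySem.List.pySetD (PySem.List.pyGetD t i []) j (PySem.List.pyGetD c i 0)))
      ((PySem.List.pyRange 0 N 1).map g)
    = (PySem.List.pyRange 0 N 1).map (fun i =>
        if i < (m : Int) then PySem.List.pySetD (g i) j (PySem.List.pyGetD c i 0) else g i) := by
  intro m
  induction m with
  | zero =>
    intro _
    rw [show ((0 : Nat) : Int) = 0 by norm_num, PySem.List.pyRange_one_eq_nil (le_refl 0), List.foldl_nil]
    apply List.map_congr_left
    intro i hi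
    rw [PySem.List.mem_pyRange_one] at hi
    rw [if_neg (by omega)]
  | succ m ih =>
    intro hm1
    have hmN : (m : Int) < N := by push_cast at hm1 ⊢; omega
    have : ((m + 1 : Nat) : Int) = (m : Int) + 1 := by push_cast; ring
    rw [this, PySem.List.pyRange_one_succ_right (by positivity), List.foldl_append, List.foldl_cons,
        List.foldl_nil, ih (by omega)]
    rw [PySem.List.pyGetD_map_pyRange_of_nonneg _ _ _ _ (by positivity) hmN]
    rw [if_neg (by omega)]
    simp only [PySem.List.pySetD_natCast]
    rw [set_map_pyRange _ _ _ hmN]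
    apply List.map_congr_left
    intro i hi
    rw [PySem.List.mem_pyRange_one] at hi
    by_cases h : i = (m : Int)
    · subst h; rw [if_pos rfl, if_pos (by omega)]
    · rw [if_neg h]
      by_cases h2 : i < (m : Int)
      · rw [if_pos h2, if_pos (by omega)]
      · rw [if_neg h2, if_neg (by omega)]

lemma col_fold (N : Int) (hN : 0 ≤ N) (cR : Int → List Int) : ∀ (k : Nat), (k : Int) ≤ N →
    (PySem.List.pyRange 0 (k : Int) 1).foldl (fun temp j =>
      (PySem.List.pyRange 0 N 1).foldl (fun t i =>
        PySem.List.pySetD t i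
          (PySem.List.pySetD (PySem.List.pyGetD t i []) j (PySem.List.pyGetD (cR j) i 0))) temp)
      ((PySem.List.pyRange 0 N 1).map (fun _ => List.replicate N.toNat (0 : Int)))
    = (PySem.List.pyRange 0 N 1).map (fun i =>
        (PySem.List.pyRange 0 N 1).map (fun j =>
          if j < (k : Int) then PySem.List.pyGetD (cR j) i 0 else 0)) := by
  intro k
  induction k with
  | zero =>
    intro _
    rw [show ((0 : Nat) : Int) = 0 by norm_num, PySem.List.pyRange_one_eq_nil (le_refl 0), List.foldl_nil]
    apply List.map_congr_left
    intro i _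
    have : (PySem.List.pyRange 0 N 1).map (fun j => if j < (0:Int) then PySem.List.pyGetD (cR j) i 0 else (0:Int))
         = (PySem.List.pyRange 0 N 1).map (fun _ => (0:Int)) := by
      apply List.map_congr_left
      intro jj hj
      rw [PySem.List.mem_pyRange_one] at hj
      rw [if_neg (by omega)]
    rw [this, List.map_const', PySem.List.length_pyRange_one]
    norm_num
  | succ k ih =>
    intro hk1
    have hkN : (k : Int) < N := by push_cast at hk1 ⊢; omega
    have : ((k + 1 : Nat) : Int) = (k : Int) + 1 := by push_cast; ring
    rw [this, PySem.List.pyRange_one_succ_right (by positivity), List.foldl_append, List.foldl_cons,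
        List.foldl_nil, ih (by omega)]
    have hNN : ((N.toNat : Nat) : Int) = N := by omega
    have W := wc_map N (k : Int) (cR (k : Int))
      (fun i => (PySem.List.pyRange 0 N 1).map (fun j =>
        if j < (k : Int) then PySem.List.pyGetD (cR j) i 0 else 0)) N.toNat (by omega)
    rw [hNN] at W
    rw [W]
    apply List.map_congr_left
    intro i hi
    rw [PySem.List.mem_pyRange_one] at hi
    rw [if_pos (by omega)]
    simp only [PySem.List.pySetD_natCast]
    rw [set_map_pyRange _ _ _ hkN]
    apply List.map_congr_left
    intro jj hj
    rw [PySem.List.mem_pyRange_one] at hj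
    by_cases h : jj = (k : Int)
    · subst h; rw [if_pos rfl, if_pos (by omega)]
    · rw [if_neg h]
      by_cases h2 : jj < (k : Int)
      · rw [if_pos h2, if_pos (by omega)]
      · rw [if_neg h2, if_neg (by omega)]

lemma action_eq_alt : ∀ (N : Int) (matrix : List (List Int)) (direction : String),
    action N matrix direction = action_alt N matrix direction := by
  intro N matrix direction
  by_cases hL : direction = "L"
  · subst hL
    simp only [action, action_alt, String.reduceBEq, String.reduceEq, beq_iff_eq, Bool.false_eq_true, Bool.true_eq_false, if_false, if_true, ite_false, ite_true, reduceIte]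
    rw [PySem.List.foldl_append_singleton_eq_map, List.nil_append]
    apply List.map_congr_left
    intro row _
    rw [procL_eq]
    simp [bPadR]
  · by_cases hR : direction = "R"
    · subst hR
      simp only [action, action_alt, String.reduceBEq, Bool.false_eq_true, if_false, if_true]
      rw [PySem.List.foldl_append_singleton_eq_map, List.nil_append]
      apply List.map_congr_left
      intro row _
      rw [procR_eq]
      simp [bPadL]
    · by_cases hU : direction = "U"
      · subst hU
        simp only [action, action_alt, String.reduceBEq, Bool.false_eq_true, if_false, if_true]
        simp only [PySem.List.foldl_append_singleton_eq_map, List.nil_append]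
        by_cases hN : 0 ≤ N
        · have hNN : ((N.toNat : Nat) : Int) = N := by omega
          have C := col_fold N hN (fun j =>
            aProcL ((PySem.List.pyRange 0 N 1).map (fun i =>
              PySem.List.pyGetD (PySem.List.pyGetD matrix i []) j 0)) ++
            List.replicate (N - PySem.List.len (aProcL ((PySem.List.pyRange 0 N 1).map (fun i =>
              PySem.List.pyGetD (PySem.List.pyGetD matrix i []) j 0)))).toNat 0) N.toNat (by omega)
          rw [hNN] at C
          rw [C, List.map_map]
          apply List.map_congr_left
          intro i hi
          apply List.map_congr_left
          intro j hj
          rw [PySem.List.mem_pyRange_one] at hi hj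
          rw [if_pos (by omega)]
          rw [PySem.List.pyGetD_map_pyRange_of_nonneg _ _ _ _ (by omega) (by omega)]
          simp only [Function.comp_apply]
          rw [procL_eq]
          simp [bPadR]
        · have hno : PySem.List.pyRange 0 N 1 = [] := PySem.List.pyRange_one_eq_nil (by omega)
          rw [hno]
          simp
      · by_cases hD : direction = "D"
        · subst hD
          simp only [action, action_alt, String.reduceBEq, Bool.false_eq_true, if_false, if_true]
          simp only [PySem.List.foldl_append_singleton_eq_map, List.nil_append]
          by_cases hN : 0 ≤ N
          · have hNN : ((N.toNat : Nat) : Int) = N := by omega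
            have C := col_fold N hN (fun j =>
              List.replicate (N - PySem.List.len (aProcR ((PySem.List.pyRange 0 N 1).map (fun i =>
                PySem.List.pyGetD (PySem.List.pyGetD matrix i []) j 0)))).toNat 0 ++
              aProcR ((PySem.List.pyRange 0 N 1).map (fun i =>
                PySem.List.pyGetD (PySem.List.pyGetD matrix i []) j 0))) N.toNat (by omega)
            rw [hNN] at C
            rw [C, List.map_map]
            apply List.map_congr_left
            intro i hi
            apply List.map_congr_left
            intro j hj
            rw [PySem.List.mem_pyRange_one] at hi hj
            rw [if_pos (by omega)]
            rw [PySem.List.pyGetD_map_pyRange_of_nonneg _ _ _ _ (by omega) (by omega)]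
            simp only [Function.comp_apply]
            rw [procR_eq]
            simp [bPadL]
          · have hno : PySem.List.pyRange 0 N 1 = [] := PySem.List.pyRange_one_eq_nil (by omega)
            rw [hno]
            simp
        · simp [action, action_alt, hL, hR, hU, hD]

-- ===== VERDICT (by name: the statement is the Claim_ definition above) =====
theorem action_spec : Claim_equal_action :=
  fun N matrix direction _ _ => action_eq_alt N matrix direction
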